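-- pv_equiv track=rewrite | github.com/van1164/algorithm_study_python | BOJ5568.py | recursive
-- ===== SOURCE A (Python) =====
-- def recursive(graph,visited,length,finish,count = 1,string = '',temp = ''):
--
--     for i in range(length):
--         if str(i) not in temp :
--             a = string +graph[i]
--             b = graph[i]  + string
--             if count == finish:
--                 if a not in visited:
--                     visited.add(a)
--                 if b not in visited:
--                     visited.add(b)
--             else:
--                 recursive(graph,visited,length,finish,count+1,a,temp +str(i))
--                 recursive(graph,visited,length,finish,count+1,b,temp+str(i))
--         else:
--             continue
--     return visited
-- ===== SOURCE B (Python) =====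
-- def recursive(graph, visited, length, finish, count=1, string='', temp=''):
--     # Iterative depth-first traversal with an explicit stack instead of recursion.
--     stack = [(count, string, temp)]
--     while stack:
--         c, s, t = stack.pop()
--         children = []
--         for i in range(length):
--             si = str(i)
--             if si in t:
--                 continue
--             a = s + graph[i]
--             b = graph[i] + s
--             if c == finish:
--                 if a not in visited:
--                     visited.add(a)
--                 if b not in visited:
--                     visited.add(b)
--             else:
--                 children.append((c + 1, a, t + si))
--                 children.append((c + 1, b, t + si))
--         stack.extend(reversed(children))
--     return visited
-- ===== Notes on version B (the rewrite author's own statement) =====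
-- stated objective: alternative
-- what changed: A's self-recursive backtracking is replaced by an iterative depth-first loop over an explicit stack of (count, string, temp) states: each popped node's scan performs the leaf insertions and materialises its child states, which are pushed so that the visiting order (and hence the returned set and its insertion order) is identical.
import Mathlib
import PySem

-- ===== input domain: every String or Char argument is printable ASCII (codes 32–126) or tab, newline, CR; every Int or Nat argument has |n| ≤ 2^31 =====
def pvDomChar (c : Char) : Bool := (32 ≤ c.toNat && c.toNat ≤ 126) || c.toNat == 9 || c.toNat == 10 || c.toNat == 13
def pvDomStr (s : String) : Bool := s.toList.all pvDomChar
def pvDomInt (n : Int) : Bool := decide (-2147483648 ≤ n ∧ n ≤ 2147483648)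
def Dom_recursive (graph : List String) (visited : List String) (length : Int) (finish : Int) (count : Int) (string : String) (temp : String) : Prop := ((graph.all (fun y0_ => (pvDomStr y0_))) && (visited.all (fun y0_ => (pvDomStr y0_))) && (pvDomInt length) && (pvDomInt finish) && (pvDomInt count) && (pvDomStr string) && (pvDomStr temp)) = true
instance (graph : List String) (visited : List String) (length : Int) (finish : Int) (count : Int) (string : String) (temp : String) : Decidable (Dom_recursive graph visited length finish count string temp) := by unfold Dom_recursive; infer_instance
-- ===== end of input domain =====

-- B replaces A's recursion by an iterative depth-first loop over an explicit stack that
-- materialises each node's child states before descending (objective: alternative; same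
-- visiting order, hence the same result in the same insertion order). Both programs mutate
-- `visited` in place in Python; the equivalence proved here is about the returned value
-- (which is that same set). A's IndexError (graph[i] with i >= len(graph)) is modelled by
-- Option-propagation inside both ports and excluded by Pre_; outside Pre_ both ports
-- return [] (Python raises there).

-- ===== PORT A =====
-- A-side helpers, needed for the termination of the port (A's recursion is bounded by the
-- number of indices of range(length) still available, i.e. with str(i) not a substring of temp)
def pvPhi (length : Int) (temp : String) : Nat :=
  ((PySem.List.pyRange 0 length 1).filter
    (fun j => !(PySem.Str.isIn (PySem.Int.toStr j) temp))).length

lemma pvNeTrue {b : Bool} (h : b = false) : ¬ (b = true) := by subst h; simp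

-- generic strict filter-length fact used by pvPhi_append_lt
lemma pvFilterLenLt {α : Type} {l : List α} {p q : α → Bool}
    (h : ∀ x ∈ l, p x = true → q x = true) {x : α} (hx : x ∈ l)
    (hq : q x = true) (hp : p x = false) :
    (l.filter p).length < (l.filter q).length := by
  induction l with
  | nil => cases hx
  | cons a l ih =>
    rcases List.mem_cons.mp hx with rfl | hx'
    · simp only [List.filter_cons, hq, hp, if_pos, Bool.false_eq_true, if_neg, not_false_iff]
      have : (l.filter p).length ≤ (l.filter q).length := by
        simp only [← List.countP_eq_length_filter]
        exact List.countP_mono_left (fun a ha hpa => h a (List.mem_cons_of_mem _ ha) hpa)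
      simpa using Nat.lt_succ_of_le this
    · have ihx := ih (fun y hy => h y (List.mem_cons_of_mem _ hy)) hx'
      by_cases hpa : p a = true
      · have hqa := h a (List.mem_cons_self) hpa
        simpa [List.filter_cons, hpa, hqa] using Nat.succ_lt_succ ihx
      · simp only [List.filter_cons]
        rw [Bool.not_eq_true] at hpa
        simp only [hpa, Bool.false_eq_true, if_neg, not_false_iff]
        cases hqa : q a
        · simpa using ihx
        · simpa using Nat.lt_succ_of_lt ihx

-- substring monotonicity: 'u in t' implies 'u in t ++ w'
lemma pvIsInAppend {u t w : String} (h : PySem.Str.isIn u t = true) :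
    PySem.Str.isIn u (t ++ w) = true := by
  rw [PySem.Str.isIn_iff_infix] at h ⊢
  rw [String.toList_append]
  exact h.trans ⟨[], w.toList, by simp⟩

-- appending str(i) makes index i unavailable, so the available count strictly drops
lemma pvPhi_append_lt (length : Int) (temp : String) (i : Int)
    (hi : i ∈ PySem.List.pyRange 0 length 1)
    (hav : PySem.Str.isIn (PySem.Int.toStr i) temp = false) :
    pvPhi length (temp ++ PySem.Int.toStr i) < pvPhi length temp := by
  unfold pvPhi
  refine pvFilterLenLt (p := fun j => !(PySem.Str.isIn (PySem.Int.toStr j) (temp ++ PySem.Int.toStr i)))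
    (q := fun j => !(PySem.Str.isIn (PySem.Int.toStr j) temp)) ?_ hi ?_ ?_
  · intro x _ hx
    simp only [Bool.not_eq_true'] at hx ⊢
    cases h' : PySem.Str.isIn (PySem.Int.toStr x) temp
    · rfl
    · rw [pvIsInAppend h'] at hx; simp at hx
  · simp only [Bool.not_eq_true']; exact hav
  · simp only [Bool.not_eq_false']
    rw [PySem.Str.isIn_iff_infix, String.toList_append]
    exact (List.suffix_append _ _).isInfix

-- port of A: the for-loop over range(length) is the structural recursion over the remaining
-- index list `is` (a sub-list of range(length), witnessed by hsub, used only for termination);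
-- 'if x not in visited: visited.add(x)' on a Python set is exactly PySem.Set.add;
-- `none` = the IndexError of graph[i] propagating out of the recursion
def recursiveGo (graph : List String) (length finish : Int) (count : Int)
    (string temp : String) (is : List Int)
    (hsub : ∀ j ∈ is, j ∈ PySem.List.pyRange 0 length 1)
    (visited : List String) : Option (List String) :=
  match is with
  | [] => some visited
  | i :: rest =>
    if h : PySem.Str.isIn (PySem.Int.toStr i) temp = true then
      -- 'else: continue'
      recursiveGo graph length finish count string temp rest
        (fun j hj => hsub j (List.mem_cons_of_mem _ hj)) visited
    else
      match PySem.List.pyGet? graph i with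
      | none => none   -- graph[i] raises IndexError
      | some g =>
        if count = finish then
          recursiveGo graph length finish count string temp rest
            (fun j hj => hsub j (List.mem_cons_of_mem _ hj))
            (PySem.Set.add (PySem.Set.add visited (string ++ g)) (g ++ string))
        else
          match recursiveGo graph length finish (count + 1) (string ++ g)
              (temp ++ PySem.Int.toStr i) (PySem.List.pyRange 0 length 1)
              (fun _ hj => hj) visited with
          | none => none
          | some v1 =>
            match recursiveGo graph length finish (count + 1) (g ++ string)
                (temp ++ PySem.Int.toStr i) (PySem.List.pyRange 0 length 1)
                (fun _ hj => hj) v1 with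
            | none => none
            | some v2 =>
              recursiveGo graph length finish count string temp rest
                (fun j hj => hsub j (List.mem_cons_of_mem _ hj)) v2
termination_by (pvPhi length temp, is.length)
decreasing_by
  all_goals first
    | exact Prod.Lex.right _ (by simp)
    | exact Prod.Lex.left _ _
        (pvPhi_append_lt length temp i (hsub i List.mem_cons_self) ((Bool.not_eq_true _) ▸ h))

def recursive (graph : List String) (visited : List String) (length : Int) (finish : Int) (count : Int) (string : String) (temp : String) : List String :=
  (recursiveGo graph length finish count string temp (PySem.List.pyRange 0 length 1)
    (fun _ hj => hj) visited).getD []   -- the [] is never reached under Pre_ (Python raises there)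

-- ===== PORT B =====
-- B-side helper: one pass of B's inner for-loop over the remaining indices `is` of the popped
-- node (c, s, t): performs the leaf insertions into visited and collects the child states, in
-- order; `none` = the IndexError of graph[i]
def scanNode (graph : List String) (length finish : Int) (c : Int) (s t : String)
    (is : List Int) (visited : List String) :
    Option (List String × List (Int × String × String)) :=
  match is with
  | [] => some (visited, [])
  | i :: rest =>
    if PySem.Str.isIn (PySem.Int.toStr i) t then
      scanNode graph length finish c s t rest visited
    else
      match PySem.List.pyGet? graph i with
      | none => none   -- graph[i] raises IndexError
      | some g =>
        if c = finish then
          scanNode graph length finish c s t rest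
            (PySem.Set.add (PySem.Set.add visited (s ++ g)) (g ++ s))
        else
          match scanNode graph length finish c s t rest visited with
          | none => none
          | some r =>
            some (r.1, (c + 1, s ++ g, t ++ PySem.Int.toStr i) ::
                       (c + 1, g ++ s, t ++ PySem.Int.toStr i) :: r.2)

-- single-step unfoldings of scanNode, used by the termination argument of runStack (and below)
lemma pvScanNil (graph : List String) (length finish c : Int) (s t : String) (v : List String) :
    scanNode graph length finish c s t [] v = some (v, []) := rfl

lemma pvScanSkip (graph : List String) (length finish c : Int) (s t : String) (i : Int)
    (rest : List Int) (v : List String) (h : PySem.Str.isIn (PySem.Int.toStr i) t = true) :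
    scanNode graph length finish c s t (i :: rest) v = scanNode graph length finish c s t rest v := by
  rw [scanNode, if_pos h]

lemma pvScanErr (graph : List String) (length finish c : Int) (s t : String) (i : Int)
    (rest : List Int) (v : List String) (h : PySem.Str.isIn (PySem.Int.toStr i) t = false)
    (hg : PySem.List.pyGet? graph i = none) :
    scanNode graph length finish c s t (i :: rest) v = none := by
  rw [scanNode, if_neg (pvNeTrue h), hg]

lemma pvScanLeaf (graph : List String) (length finish c : Int) (s t : String) (i : Int)
    (rest : List Int) (v : List String) (g : String)
    (h : PySem.Str.isIn (PySem.Int.toStr i) t = false)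
    (hg : PySem.List.pyGet? graph i = some g) (hc : c = finish) :
    scanNode graph length finish c s t (i :: rest) v = scanNode graph length finish c s t rest
      (PySem.Set.add (PySem.Set.add v (s ++ g)) (g ++ s)) := by
  rw [scanNode, if_neg (pvNeTrue h), hg]
  show (if c = finish then _ else _) = _
  rw [if_pos hc]

lemma pvScanBranch (graph : List String) (length finish c : Int) (s t : String) (i : Int)
    (rest : List Int) (v : List String) (g : String)
    (h : PySem.Str.isIn (PySem.Int.toStr i) t = false)
    (hg : PySem.List.pyGet? graph i = some g) (hc : c ≠ finish) :
    scanNode graph length finish c s t (i :: rest) v =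
      (scanNode graph length finish c s t rest v).map
        (fun r => (r.1, (c + 1, s ++ g, t ++ PySem.Int.toStr i) ::
                        (c + 1, g ++ s, t ++ PySem.Int.toStr i) :: r.2)) := by
  rw [scanNode, if_neg (pvNeTrue h), hg]
  show (if c = finish then _ else _) = _
  rw [if_neg hc]
  cases scanNode graph length finish c s t rest v with
  | none => rfl
  | some r => rfl

-- B-side termination measure: each stack entry with potential φ weighs (K+1)^φ
def pvWeight (length : Int) (e : Int × String × String) : Nat :=
  (2 * (PySem.List.pyRange 0 length 1).length + 1) ^ pvPhi length e.2.2

def pvM (length : Int) (stack : List (Int × String × String)) : Nat :=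
  (stack.map (pvWeight length)).sum

lemma pvScanChildren (graph : List String) (length finish : Int) (c : Int) (s t : String)
    (is : List Int) (visited : List String)
    (hsub : ∀ j ∈ is, j ∈ PySem.List.pyRange 0 length 1)
    (r : List String × List (Int × String × String))
    (hr : scanNode graph length finish c s t is visited = some r) :
    r.2.length ≤ 2 * is.length ∧ ∀ e ∈ r.2, pvPhi length e.2.2 < pvPhi length t := by
  induction is generalizing visited r with
  | nil => rw [pvScanNil] at hr; cases hr; simp
  | cons i rest ih =>
    have hrest : ∀ j ∈ rest, j ∈ PySem.List.pyRange 0 length 1 :=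
      fun j hj => hsub j (List.mem_cons_of_mem _ hj)
    by_cases h : PySem.Str.isIn (PySem.Int.toStr i) t = true
    · rw [pvScanSkip graph length finish c s t i rest visited h] at hr
      obtain ⟨h1, h2⟩ := ih visited hrest r hr
      exact ⟨h1.trans (by rw [List.length_cons]; omega), h2⟩
    · replace h : PySem.Str.isIn (PySem.Int.toStr i) t = false := (Bool.not_eq_true _) ▸ h
      cases hg : PySem.List.pyGet? graph i with
      | none => rw [pvScanErr graph length finish c s t i rest visited h hg] at hr; cases hr
      | some g =>
        by_cases hc : c = finish
        · rw [pvScanLeaf graph length finish c s t i rest visited g h hg hc] at hr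
          obtain ⟨h1, h2⟩ := ih _ hrest r hr
          exact ⟨h1.trans (by rw [List.length_cons]; omega), h2⟩
        · rw [pvScanBranch graph length finish c s t i rest visited g h hg hc] at hr
          cases hr' : scanNode graph length finish c s t rest visited with
          | none => rw [hr'] at hr; cases hr
          | some r' =>
            rw [hr'] at hr
            cases hr
            obtain ⟨h1, h2⟩ := ih visited hrest r' hr'
            have hlt : pvPhi length (t ++ PySem.Int.toStr i) < pvPhi length t :=
              pvPhi_append_lt length t i (hsub i List.mem_cons_self) h
            refine ⟨by simp only [List.length_cons]; omega, ?_⟩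
            rintro e he
            rcases List.mem_cons.mp he with rfl | he'
            · exact hlt
            · rcases List.mem_cons.mp he' with rfl | he''
              · exact hlt
              · exact h2 e he''

lemma pvSumPowLt (K a : Nat) (l : List Nat) (hlen : l.length ≤ K)
    (h : ∀ x ∈ l, x < a) : ((l.map fun x => (K + 1) ^ x).sum) < (K + 1) ^ a := by
  cases a with
  | zero =>
    cases l with
    | nil => simp
    | cons x l => exact absurd (h x List.mem_cons_self) (by omega)
  | succ n =>
    have hb : ∀ y ∈ l.map fun x => (K + 1) ^ x, y ≤ (K + 1) ^ n := by
      intro y hy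
      rcases List.mem_map.mp hy with ⟨x, hx, rfl⟩
      exact Nat.pow_le_pow_right (by omega) (by have := h x hx; omega)
    have hsum := List.sum_le_card_nsmul _ _ hb
    simp only [List.length_map, smul_eq_mul] at hsum
    have hpos : 0 < (K + 1) ^ n := Nat.pow_pos (by omega)
    calc (l.map fun x => (K + 1) ^ x).sum ≤ l.length * (K + 1) ^ n := hsum
      _ ≤ K * (K + 1) ^ n := Nat.mul_le_mul_right _ hlen
      _ < (K + 1) * (K + 1) ^ n := (Nat.mul_lt_mul_right hpos).mpr (Nat.lt_succ_self K)
      _ = (K + 1) ^ (n + 1) := by ring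

lemma pvM_lt (graph : List String) (length finish : Int) (c : Int) (s t : String)
    (rest : List (Int × String × String)) (visited : List String)
    (r : List String × List (Int × String × String))
    (hr : scanNode graph length finish c s t (PySem.List.pyRange 0 length 1) visited = some r) :
    pvM length (r.2 ++ rest) < pvM length ((c, s, t) :: rest) := by
  have hch := pvScanChildren graph length finish c s t (PySem.List.pyRange 0 length 1) visited
    (fun _ hj => hj) r hr
  unfold pvM
  rw [List.map_append, List.sum_append, List.map_cons, List.sum_cons]
  refine Nat.add_lt_add_right ?_ _
  have hs := pvSumPowLt (2 * (PySem.List.pyRange 0 length 1).length) (pvPhi length t)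
    (r.2.map (fun e => pvPhi length e.2.2))
    (by rw [List.length_map]; exact hch.1)
    (by intro x hx; rcases List.mem_map.mp hx with ⟨e, he, rfl⟩; exact hch.2 e he)
  rw [List.map_map] at hs
  exact hs

-- port of B: the while-loop over the explicit stack; the head of the list is the top of the
-- stack (Python pops from the end and extends with reversed(children), so the next node popped
-- is children[0]: the children sit, in order, in front of the remaining stack)
def runStack (graph : List String) (length finish : Int)
    (stack : List (Int × String × String)) (visited : List String) : Option (List String) :=
  match stack with
  | [] => some visited
  | (c, s, t) :: rest =>
    match hr : scanNode graph length finish c s t (PySem.List.pyRange 0 length 1) visited with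
    | none => none
    | some r => runStack graph length finish (r.2 ++ rest) r.1
termination_by pvM length stack
decreasing_by
  exact pvM_lt graph length finish c s t rest visited r hr

def recursive_alt (graph : List String) (visited : List String) (length : Int) (finish : Int) (count : Int) (string : String) (temp : String) : List String :=
  (runStack graph length finish [(count, string, temp)] visited).getD []   -- [] never reached under Pre_

-- ===== PRECONDITION & SPEC =====
-- Pre_ excludes exactly the inputs on which Python A raises IndexError: some i in
-- range(length) with str(i) not a substring of temp reaching graph[i] with i >= len(graph).
-- The quantifier is capped at (|temp|+1)^2 + 1 candidate indices so that it is decidable in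
-- bounded time: temp has at most (|temp|+1)^2 distinct substrings, so if more candidates than
-- that exist, one of them necessarily escapes temp and A raises anyway.
def Pre_recursive (graph : List String) (visited : List String) (length : Int) (finish : Int) (count : Int) (string : String) (temp : String) : Prop :=
  ∀ i ∈ PySem.List.pyRange (graph.length : Int)
      (min length ((graph.length : Int) + ((temp.toList.length : Int) + 1) ^ 2 + 1)) 1,
    PySem.Str.isIn (PySem.Int.toStr i) temp = true
instance (graph : List String) (visited : List String) (length : Int) (finish : Int) (count : Int) (string : String) (temp : String) : Decidable (Pre_recursive graph visited length finish count string temp) := by unfold Pre_recursive; infer_instance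

def pvWitness_recursive : List String × List String × Int × Int × Int × String × String :=
  (["ab", "cd"], [], 2, 2, 1, "", "")

def Spec_recursive (graph : List String) (visited : List String) (length : Int) (finish : Int) (count : Int) (string : String) (temp : String) (out : List String) : Prop := out = recursive_alt graph visited length finish count string temp
instance (graph : List String) (visited : List String) (length : Int) (finish : Int) (count : Int) (string : String) (temp : String) (out : List String) : Decidable (Spec_recursive graph visited length finish count string temp out) := by unfold Spec_recursive; infer_instance

-- ===== CLAIM (what is proved, stated in full; the proofs are below) =====
def Claim_equal_recursive : Prop := ∀ (graph : List String) (visited : List String) (length : Int) (finish : Int) (count : Int) (string : String) (temp : String), Dom_recursive graph visited length finish count string temp → Pre_recursive graph visited length finish count string temp → Spec_recursive graph visited length finish count string temp (recursive graph visited length finish count string temp)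

-- ===== LEMMAS AND PROOFS =====

-- single-step unfoldings of the port of A
lemma pvRgNil (graph : List String) (length finish count : Int) (s t : String)
    (hsub : ∀ j ∈ ([] : List Int), j ∈ PySem.List.pyRange 0 length 1) (v : List String) :
    recursiveGo graph length finish count s t [] hsub v = some v := by
  rw [recursiveGo]

lemma pvRgSkip (graph : List String) (length finish count : Int) (s t : String) (i : Int)
    (rest : List Int) (hsub : ∀ j ∈ i :: rest, j ∈ PySem.List.pyRange 0 length 1)
    (v : List String) (h : PySem.Str.isIn (PySem.Int.toStr i) t = true) :
    recursiveGo graph length finish count s t (i :: rest) hsub v =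
      recursiveGo graph length finish count s t rest
        (fun j hj => hsub j (List.mem_cons_of_mem _ hj)) v := by
  rw [recursiveGo, dif_pos h]

lemma pvRgErr (graph : List String) (length finish count : Int) (s t : String) (i : Int)
    (rest : List Int) (hsub : ∀ j ∈ i :: rest, j ∈ PySem.List.pyRange 0 length 1)
    (v : List String) (h : PySem.Str.isIn (PySem.Int.toStr i) t = false)
    (hg : PySem.List.pyGet? graph i = none) :
    recursiveGo graph length finish count s t (i :: rest) hsub v = none := by
  rw [recursiveGo, dif_neg (pvNeTrue h), hg]

lemma pvRgLeaf (graph : List String) (length finish count : Int) (s t : String) (i : Int)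
    (rest : List Int) (hsub : ∀ j ∈ i :: rest, j ∈ PySem.List.pyRange 0 length 1)
    (v : List String) (g : String) (h : PySem.Str.isIn (PySem.Int.toStr i) t = false)
    (hg : PySem.List.pyGet? graph i = some g) (hc : count = finish) :
    recursiveGo graph length finish count s t (i :: rest) hsub v =
      recursiveGo graph length finish count s t rest
        (fun j hj => hsub j (List.mem_cons_of_mem _ hj))
        (PySem.Set.add (PySem.Set.add v (s ++ g)) (g ++ s)) := by
  rw [recursiveGo, dif_neg (pvNeTrue h), hg]
  show (if count = finish then _ else _) = _
  rw [if_pos hc]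

lemma pvRgBranch (graph : List String) (length finish count : Int) (s t : String) (i : Int)
    (rest : List Int) (hsub : ∀ j ∈ i :: rest, j ∈ PySem.List.pyRange 0 length 1)
    (v : List String) (g : String) (h : PySem.Str.isIn (PySem.Int.toStr i) t = false)
    (hg : PySem.List.pyGet? graph i = some g) (hc : count ≠ finish) :
    recursiveGo graph length finish count s t (i :: rest) hsub v =
      (recursiveGo graph length finish (count + 1) (s ++ g) (t ++ PySem.Int.toStr i)
          (PySem.List.pyRange 0 length 1) (fun _ hj => hj) v).bind (fun v1 =>
        (recursiveGo graph length finish (count + 1) (g ++ s) (t ++ PySem.Int.toStr i)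
            (PySem.List.pyRange 0 length 1) (fun _ hj => hj) v1).bind (fun v2 =>
          recursiveGo graph length finish count s t rest
            (fun j hj => hsub j (List.mem_cons_of_mem _ hj)) v2)) := by
  rw [recursiveGo, dif_neg (pvNeTrue h), hg]
  show (if count = finish then _ else _) = _
  rw [if_neg hc]
  cases hX : recursiveGo graph length finish (count + 1) (s ++ g) (t ++ PySem.Int.toStr i)
      (PySem.List.pyRange 0 length 1) (fun _ hj => hj) v with
  | none => simp
  | some v1 =>
    simp only [Option.bind_some]
    cases hY : recursiveGo graph length finish (count + 1) (g ++ s) (t ++ PySem.Int.toStr i)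
        (PySem.List.pyRange 0 length 1) (fun _ hj => hj) v1 with
    | none => simp
    | some v2 => simp

-- evaluating A's recursion at one node state (c, s, t)
def pvNode (graph : List String) (length finish : Int) (visited : List String)
    (e : Int × String × String) : Option (List String) :=
  recursiveGo graph length finish e.1 e.2.1 e.2.2 (PySem.List.pyRange 0 length 1)
    (fun _ hj => hj) visited

-- when c ≠ finish a scan never touches visited and its children do not depend on it
lemma pvScanShape (graph : List String) (length finish : Int) (c : Int) (s t : String)
    (is : List Int) (hc : c ≠ finish) (v v' : List String) :
    scanNode graph length finish c s t is v =
      (scanNode graph length finish c s t is v').map (fun r => (v, r.2)) := by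
  induction is generalizing v v' with
  | nil => rw [pvScanNil, pvScanNil]; rfl
  | cons i rest ih =>
    by_cases h : PySem.Str.isIn (PySem.Int.toStr i) t = true
    · rw [pvScanSkip graph length finish c s t i rest v h,
        pvScanSkip graph length finish c s t i rest v' h]
      exact ih v v'
    · replace h : PySem.Str.isIn (PySem.Int.toStr i) t = false := (Bool.not_eq_true _) ▸ h
      cases hg : PySem.List.pyGet? graph i with
      | none =>
        rw [pvScanErr graph length finish c s t i rest v h hg,
          pvScanErr graph length finish c s t i rest v' h hg]
        rfl
      | some g =>
        rw [pvScanBranch graph length finish c s t i rest v g h hg hc,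
          pvScanBranch graph length finish c s t i rest v' g h hg hc]
        rw [ih v v']
        cases scanNode graph length finish c s t rest v' with
        | none => rfl
        | some r' => rfl

-- if c ≠ finish and the scan succeeds, it returns visited unchanged
lemma pvScanFstEq (graph : List String) (length finish : Int) (c : Int) (s t : String)
    (is : List Int) (hc : c ≠ finish) (v : List String)
    (r : List String × List (Int × String × String))
    (hsr : scanNode graph length finish c s t is v = some r) : r.1 = v := by
  have hsh := pvScanShape graph length finish c s t is hc v v
  rw [hsr] at hsh
  simp only [Option.map_some] at hsh
  rw [Option.some.inj hsh]

-- one scan followed by recursing into the collected children, in order, is exactly A's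
-- processing of the same remaining indices (with the IndexError propagating identically)
lemma pvScanFold (graph : List String) (length finish : Int) (c : Int) (s t : String)
    (is : List Int) (hsub : ∀ j ∈ is, j ∈ PySem.List.pyRange 0 length 1)
    (visited : List String) :
    (scanNode graph length finish c s t is visited).bind
        (fun r => List.foldlM (pvNode graph length finish) r.1 r.2)
      = recursiveGo graph length finish c s t is hsub visited := by
  induction is generalizing visited with
  | nil => rw [pvScanNil, pvRgNil]; rfl
  | cons i rest ih =>
    have hrest : ∀ j ∈ rest, j ∈ PySem.List.pyRange 0 length 1 :=
      fun j hj => hsub j (List.mem_cons_of_mem _ hj)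
    by_cases h : PySem.Str.isIn (PySem.Int.toStr i) t = true
    · rw [pvScanSkip graph length finish c s t i rest visited h,
        pvRgSkip graph length finish c s t i rest hsub visited h]
      exact ih hrest visited
    · replace h : PySem.Str.isIn (PySem.Int.toStr i) t = false := (Bool.not_eq_true _) ▸ h
      cases hg : PySem.List.pyGet? graph i with
      | none =>
        rw [pvScanErr graph length finish c s t i rest visited h hg,
          pvRgErr graph length finish c s t i rest hsub visited h hg]
        rfl
      | some g =>
        by_cases hc : c = finish
        · rw [pvScanLeaf graph length finish c s t i rest visited g h hg hc,
            pvRgLeaf graph length finish c s t i rest hsub visited g h hg hc]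
          exact ih hrest _
        · rw [pvScanBranch graph length finish c s t i rest visited g h hg hc,
            pvRgBranch graph length finish c s t i rest hsub visited g h hg hc]
          cases hA : recursiveGo graph length finish (c + 1) (s ++ g) (t ++ PySem.Int.toStr i)
              (PySem.List.pyRange 0 length 1) (fun _ hj => hj) visited with
          | none =>
            have hAp : pvNode graph length finish visited
                (c + 1, s ++ g, t ++ PySem.Int.toStr i) = none := hA
            cases hsr : scanNode graph length finish c s t rest visited with
            | none => simp
            | some r =>
              have h1 := pvScanFstEq graph length finish c s t rest hc visited r hsr
              simp [List.foldlM_cons, h1, hAp]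
          | some v1 =>
            have hAp : pvNode graph length finish visited
                (c + 1, s ++ g, t ++ PySem.Int.toStr i) = some v1 := hA
            simp only [Option.bind_some]
            cases hB : recursiveGo graph length finish (c + 1) (g ++ s) (t ++ PySem.Int.toStr i)
                (PySem.List.pyRange 0 length 1) (fun _ hj => hj) v1 with
            | none =>
              have hBp : pvNode graph length finish v1
                  (c + 1, g ++ s, t ++ PySem.Int.toStr i) = none := hB
              cases hsr : scanNode graph length finish c s t rest visited with
              | none => simp
              | some r =>
                have h1 := pvScanFstEq graph length finish c s t rest hc visited r hsr
                simp [List.foldlM_cons, h1, hAp, hBp]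
            | some v2 =>
              have hBp : pvNode graph length finish v1
                  (c + 1, g ++ s, t ++ PySem.Int.toStr i) = some v2 := hB
              simp only [Option.bind_some]
              have hI := ih hrest v2
              rw [pvScanShape graph length finish c s t rest hc visited v2]
              cases hsr2 : scanNode graph length finish c s t rest v2 with
              | none =>
                rw [hsr2] at hI
                rw [← hI]
                simp
              | some r2 =>
                have h21 := pvScanFstEq graph length finish c s t rest hc v2 r2 hsr2
                rw [hsr2] at hI
                rw [← hI]
                simp [List.foldlM_cons, h21, hAp, hBp]

-- running the stack is the monadic fold of A's node evaluation over its entries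
lemma pvRunFold (graph : List String) (length finish : Int) :
    ∀ n (stack : List (Int × String × String)) (visited : List String),
      pvM length stack = n →
      runStack graph length finish stack visited
        = List.foldlM (pvNode graph length finish) visited stack := by
  intro n
  induction n using Nat.strong_induction_on with
  | _ n ih =>
    intro stack visited hn
    match stack with
    | [] => rw [runStack]; rfl
    | (c, s, t) :: rest =>
      subst hn
      rw [runStack]
      have hfold := pvScanFold graph length finish c s t (PySem.List.pyRange 0 length 1)
        (fun _ hj => hj) visited
      split
      · rename_i heq
        rw [heq] at hfold
        rw [List.foldlM_cons]
        rw [show pvNode graph length finish visited (c, s, t)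
            = recursiveGo graph length finish c s t (PySem.List.pyRange 0 length 1)
                (fun _ hj => hj) visited from rfl, ← hfold]
        simp
      · rename_i r heq
        rw [heq] at hfold
        have hm := pvM_lt graph length finish c s t rest visited r heq
        rw [ih _ hm _ _ rfl]
        rw [List.foldlM_append, List.foldlM_cons]
        rw [show pvNode graph length finish visited (c, s, t)
            = recursiveGo graph length finish c s t (PySem.List.pyRange 0 length 1)
                (fun _ hj => hj) visited from rfl, ← hfold]
        simp

-- ===== VERDICT (by name: the statement is the Claim_ definition above) =====
theorem recursive_spec : Claim_equal_recursive := by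
  intro graph visited length finish count string temp _ _
  unfold Spec_recursive recursive recursive_alt
  rw [pvRunFold graph length finish _ _ _ rfl]
  simp only [List.foldlM_cons, List.foldlM_nil]
  rw [show pvNode graph length finish visited (count, string, temp)
      = recursiveGo graph length finish count string temp (PySem.List.pyRange 0 length 1)
          (fun _ hj => hj) visited from rfl]
  cases recursiveGo graph length finish count string temp (PySem.List.pyRange 0 length 1)
      (fun _ hj => hj) visited with
  | none => rfl
  | some v => rfl
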